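-- pv_equiv track=rewrite | github.com/bpwhelan/GameSentenceMiner | GameSentenceMiner/obs_old.py | sort_video_sources_by_preference
-- ===== SOURCE A (Python) =====
-- from typing import Callable, Dict, List, Optional
--
-- VIDEO_SOURCE_KINDS = {"window_capture", "game_capture", "monitor_capture"}
--
-- VIDEO_SOURCE_PRIORITY = {
--     "game_capture": 0,
--     "window_capture": 1,
--     "monitor_capture": 2,
-- }
--
-- def get_video_source_priority(input_kind: Optional[str]) -> int:
--     return VIDEO_SOURCE_PRIORITY.get(str(input_kind or ""), 999)
--
-- def sort_video_sources_by_preference(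
--     scene_items: List[dict],
--     input_active_by_name: Optional[Dict[str, bool]] = None,
--     input_show_by_name: Optional[Dict[str, bool]] = None,
-- ) -> List[dict]:
--     """
--     Sort scene items so working game capture is preferred, with window capture as fallback.
--
--     Sources explicitly marked inactive or hidden are pushed behind candidates that still have
--     a chance of producing output.
--     """
--     if not scene_items:
--         return []
--
--     video_sources = [item for item in scene_items if item.get("inputKind") in VIDEO_SOURCE_KINDS]
--     if not video_sources:
--         return list(scene_items)
--
--     def sort_key(item: dict):
--         source_name = item.get("sourceName")
--         active_state = input_active_by_name.get(source_name) if input_active_by_name else None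
--         show_state = input_show_by_name.get(source_name) if input_show_by_name else None
--         explicitly_inactive = active_state is False or show_state is False
--         return (
--             1 if explicitly_inactive else 0,
--             get_video_source_priority(item.get("inputKind")),
--         )
--
--     return sorted(video_sources, key=sort_key)
-- ===== SOURCE B (Python) =====
-- from typing import Dict, List, Optional
--
-- VIDEO_SOURCE_KINDS = {"window_capture", "game_capture", "monitor_capture"}
--
-- _KIND_OFFSET = {
--     "game_capture": 0,
--     "window_capture": 1,
--     "monitor_capture": 2,
-- }
--
-- def sort_video_sources_by_preference(
--     scene_items: List[dict],
--     input_active_by_name: Optional[Dict[str, bool]] = None,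
--     input_show_by_name: Optional[Dict[str, bool]] = None,
-- ) -> List[dict]:
--     """Single-pass bucket sort: the sort key only takes 6 values, so distribute
--     items over 6 buckets (stable) and concatenate, instead of comparison sorting."""
--     if not scene_items:
--         return []
--
--     buckets = [[], [], [], [], [], []]
--     found = False
--     for item in scene_items:
--         off = _KIND_OFFSET.get(item.get("inputKind"))
--         if off is None:
--             continue
--         found = True
--         name = item.get("sourceName")
--         active_state = input_active_by_name.get(name) if input_active_by_name else None
--         show_state = input_show_by_name.get(name) if input_show_by_name else None
--         idx = off + 3 if (active_state is False or show_state is False) else off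
--         buckets[idx].append(item)
--
--     if not found:
--         return list(scene_items)
--     return [item for bucket in buckets for item in bucket]
-- ===== Notes on version B (the rewrite author's own statement) =====
-- stated objective: alternative
-- what changed: Replaces the comparison sort over the (inactive, priority) tuple key by a single pass that distributes video sources into the 6 possible key buckets and concatenates them, preserving stability.
import Mathlib
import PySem

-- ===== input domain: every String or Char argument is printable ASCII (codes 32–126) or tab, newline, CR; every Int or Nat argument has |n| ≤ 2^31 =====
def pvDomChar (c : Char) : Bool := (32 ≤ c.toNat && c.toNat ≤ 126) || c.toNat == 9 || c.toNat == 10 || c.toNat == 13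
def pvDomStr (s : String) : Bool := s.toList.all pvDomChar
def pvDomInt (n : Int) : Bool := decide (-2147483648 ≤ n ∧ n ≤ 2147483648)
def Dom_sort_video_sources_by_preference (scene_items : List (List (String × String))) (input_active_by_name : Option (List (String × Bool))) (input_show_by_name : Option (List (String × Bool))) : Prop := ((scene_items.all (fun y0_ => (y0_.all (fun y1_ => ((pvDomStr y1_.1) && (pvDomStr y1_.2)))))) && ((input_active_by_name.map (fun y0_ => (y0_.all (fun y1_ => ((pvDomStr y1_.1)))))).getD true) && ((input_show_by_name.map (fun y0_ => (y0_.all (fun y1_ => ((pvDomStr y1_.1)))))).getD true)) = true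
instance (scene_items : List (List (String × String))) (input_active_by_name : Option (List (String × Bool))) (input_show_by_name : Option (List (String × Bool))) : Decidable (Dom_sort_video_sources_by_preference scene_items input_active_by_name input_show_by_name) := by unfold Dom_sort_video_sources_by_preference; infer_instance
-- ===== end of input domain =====

-- B replaces A's comparison sort by a single-pass stable bucket sort over the 6 possible key values (objective: alternative).

-- helpers shared by BOTH ports: both Pythons contain these exact expressions
-- item.get(k): first match in the association list (the dict convention)
def pvGetStr (item : List (String × String)) (k : String) : Option String :=
  (item.find? (fun p => p.1 == k)).map (·.2)

-- 'd.get(name) if d else None' — falsy for both None and {}; a None name matches no str key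
def pvStateGet (d? : Option (List (String × Bool))) (name : Option String) : Option Bool :=
  match d? with
  | none => none
  | some d =>
    if d.isEmpty then none
    else match name with
         | none => none
         | some n => (d.find? (fun p => p.1 == n)).map (·.2)

-- 'active_state is False or show_state is False'
def pvExplicitlyInactive (act shw : Option (List (String × Bool))) (item : List (String × String)) : Bool :=
  (pvStateGet act (pvGetStr item "sourceName") == some false) ||
  (pvStateGet shw (pvGetStr item "sourceName") == some false)

-- ===== PORT A =====
-- item.get("inputKind") in VIDEO_SOURCE_KINDS
def pvInVideoKinds (k? : Option String) : Bool :=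
  match k? with
  | some k => k == "window_capture" || k == "game_capture" || k == "monitor_capture"
  | none => false

-- VIDEO_SOURCE_PRIORITY.get(str(input_kind or ""), 999)
def get_video_source_priority (input_kind : Option String) : Int :=
  let s := input_kind.getD ""
  if s == "game_capture" then 0
  else if s == "window_capture" then 1
  else if s == "monitor_capture" then 2
  else 999

def sort_video_sources_by_preference (scene_items : List (List (String × String))) (input_active_by_name : Option (List (String × Bool))) (input_show_by_name : Option (List (String × Bool))) : List (List (String × String)) :=
  if scene_items.isEmpty then []
  else
    let video_sources := scene_items.filter (fun item => pvInVideoKinds (pvGetStr item "inputKind"))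
    if video_sources.isEmpty then scene_items
    else
      PySem.List.sorted2 video_sources
        (fun item => if pvExplicitlyInactive input_active_by_name input_show_by_name item then (1 : Int) else 0)
        (fun item => get_video_source_priority (pvGetStr item "inputKind"))
        false

-- ===== PORT B =====
-- _KIND_OFFSET.get(item.get("inputKind"))
def pvKindOffset (k? : Option String) : Option Nat :=
  match k? with
  | none => none
  | some k =>
    if k == "game_capture" then some 0
    else if k == "window_capture" then some 1
    else if k == "monitor_capture" then some 2
    else none

-- buckets[idx].append(item)
def pvBucketPut (bks : List (List (List (String × String)))) (i : Nat) (x : List (String × String)) : List (List (List (String × String))) :=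
  bks.set i (bks.getD i [] ++ [x])

def pvStepB (act shw : Option (List (String × Bool))) (st : Bool × List (List (List (String × String)))) (item : List (String × String)) : Bool × List (List (List (String × String))) :=
  match pvKindOffset (pvGetStr item "inputKind") with
  | none => st
  | some off =>
    let idx := if pvExplicitlyInactive act shw item then off + 3 else off
    (true, pvBucketPut st.2 idx item)

def sort_video_sources_by_preference_alt (scene_items : List (List (String × String))) (input_active_by_name : Option (List (String × Bool))) (input_show_by_name : Option (List (String × Bool))) : List (List (String × String)) :=
  if scene_items.isEmpty then []
  else
    let st := scene_items.foldl (pvStepB input_active_by_name input_show_by_name) (false, [[], [], [], [], [], []])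
    if st.1 then st.2.flatten else scene_items

-- ===== PRECONDITION & SPEC =====
def Spec_sort_video_sources_by_preference (scene_items : List (List (String × String))) (input_active_by_name : Option (List (String × Bool))) (input_show_by_name : Option (List (String × Bool))) (out : List (List (String × String))) : Prop := out = sort_video_sources_by_preference_alt scene_items input_active_by_name input_show_by_name
instance (scene_items : List (List (String × String))) (input_active_by_name : Option (List (String × Bool))) (input_show_by_name : Option (List (String × Bool))) (out : List (List (String × String))) : Decidable (Spec_sort_video_sources_by_preference scene_items input_active_by_name input_show_by_name out) := by unfold Spec_sort_video_sources_by_preference; infer_instance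

-- ===== CLAIM (what is proved, stated in full; the proofs are below) =====
def Claim_equal_sort_video_sources_by_preference : Prop := ∀ (scene_items : List (List (String × String))) (input_active_by_name : Option (List (String × Bool))) (input_show_by_name : Option (List (String × Bool))), Dom_sort_video_sources_by_preference scene_items input_active_by_name input_show_by_name → Spec_sort_video_sources_by_preference scene_items input_active_by_name input_show_by_name (sort_video_sources_by_preference scene_items input_active_by_name input_show_by_name)

-- ===== LEMMAS AND PROOFS =====

-- the single Int sort key both programs realise: 3·(inactive) + priority
def pvKey (act shw : Option (List (String × Bool))) (item : List (String × String)) : Int :=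
  (if pvExplicitlyInactive act shw item then 3 else 0) + get_video_source_priority (pvGetStr item "inputKind")

-- B's bucket index, as an Option
def pvIdx? (act shw : Option (List (String × Bool))) (item : List (String × String)) : Option Nat :=
  (pvKindOffset (pvGetStr item "inputKind")).map
    (fun off => if pvExplicitlyInactive act shw item then off + 3 else off)

theorem insertBy_cons_pos {α : Type} (before : α → α → Bool) (x y : α) (ys : List α) (h : before x y = true) :
    PySem.List.insertBy before x (y :: ys) = x :: y :: ys := by
  simp [PySem.List.insertBy, h]

theorem insertBy_skip {α : Type} (before : α → α → Bool) (x : α) (pre suf : List α)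
    (h : ∀ y ∈ pre, before x y = false) :
    PySem.List.insertBy before x (pre ++ suf) = pre ++ PySem.List.insertBy before x suf := by
  induction pre with
  | nil => simp
  | cons y t ih =>
      have hy : before x y = false := h y (by simp)
      simp [PySem.List.insertBy, hy]
      exact ih (fun z hz => h z (by simp [hz]))

theorem insertBy_all_pos {α : Type} (before : α → α → Bool) (x : α) (suf : List α)
    (h : ∀ y ∈ suf, before x y = true) :
    PySem.List.insertBy before x suf = x :: suf := by
  cases suf with
  | nil => simp [PySem.List.insertBy]
  | cons y t => exact insertBy_cons_pos before x y t (h y (by simp))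

theorem insert_buckets {α : Type} (before : α → α → Bool) (key : α → Int) (x : α) :
    ∀ (vals : List Int) (g : Int → List α),
      vals.Pairwise (· < ·) →
      key x ∈ vals →
      (∀ v ∈ vals, ∀ y ∈ g v, key y = v ∧ before x y = decide (key x < key y)) →
      PySem.List.insertBy before x (vals.flatMap g) =
        vals.flatMap (fun v => g v ++ if key x = v then [x] else []) := by
  intro vals
  induction vals with
  | nil => intro g _ hx _; simp at hx
  | cons v vs ih =>
      intro g hp hx hg
      have hvs : ∀ w ∈ vs, v < w := (List.pairwise_cons.mp hp).1
      have hskip0 : ∀ y ∈ g v, key y = v := fun y hy => (hg v (by simp) y hy).1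
      by_cases hv : key x = v
      · -- insert at the end of this bucket
        have hpre : ∀ y ∈ g v, before x y = false := by
          intro y hy
          have := (hg v (by simp) y hy).2
          rw [this, hskip0 y hy, hv]; simp
        have hsuf : ∀ y ∈ vs.flatMap g, before x y = true := by
          intro y hy
          rcases List.mem_flatMap.mp hy with ⟨w, hw, hyw⟩
          have hk := (hg w (by simp [hw]) y hyw).1
          have hb := (hg w (by simp [hw]) y hyw).2
          rw [hb, hk]
          simp only [decide_eq_true_eq]
          rw [hv]; exact hvs w hw
        rw [List.flatMap_cons, insertBy_skip before x _ _ hpre, insertBy_all_pos before x _ hsuf]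
        have hrest : vs.flatMap (fun w => g w ++ if key x = w then [x] else []) = vs.flatMap g := by
          apply List.flatMap_congr  -- might not exist; fallback below
          intro w hw
          have : key x ≠ w := by
            intro h; rw [hv] at h; exact absurd (h ▸ hvs w hw) (lt_irrefl _)
          simp [this]
        rw [List.flatMap_cons, hrest, if_pos hv]
        simp
      · -- bucket v is passed over
        have hx' : key x ∈ vs := by
          rcases List.mem_cons.mp hx with h | h
          · exact absurd h hv
          · exact h
        have hpre : ∀ y ∈ g v, before x y = false := by
          intro y hy
          have hb := (hg v (by simp) y hy).2
          rw [hb, hskip0 y hy]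
          simp only [decide_eq_false_iff_not]
          have : v < key x := hvs _ hx'
          omega
        rw [List.flatMap_cons, insertBy_skip before x _ _ hpre,
            ih g (List.pairwise_cons.mp hp).2 hx' (fun w hw y hy => hg w (by simp [hw]) y hy),
            List.flatMap_cons, if_neg hv]
        simp

theorem foldl_insert_buckets {α : Type} (before : α → α → Bool) (key : α → Int) (vals : List Int)
    (hp : vals.Pairwise (· < ·)) :
    ∀ (xs : List α), (∀ x ∈ xs, key x ∈ vals) →
      (∀ x ∈ xs, ∀ y ∈ xs, before x y = decide (key x < key y)) →
      xs.foldl (fun acc z => PySem.List.insertBy before z acc) [] =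
        vals.flatMap (fun v => xs.filter (fun z => decide (key z = v))) := by
  intro xs
  induction xs using List.reverseRecOn with
  | nil => simp
  | append_singleton xs x ih =>
      intro hmem hb
      rw [List.foldl_append, List.foldl_cons, List.foldl_nil,
          ih (fun z hz => hmem z (by simp [hz])) (fun a ha b hbm => hb a (by simp [ha]) b (by simp [hbm]))]
      rw [insert_buckets before key x vals _ hp (hmem x (by simp))
            (by
              intro v _ y hy
              have hy' := List.mem_filter.mp hy
              refine ⟨by simpa using hy'.2, ?_⟩
              exact hb x (by simp) y (by simp [hy'.1]))]
      apply List.flatMap_congr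
      intro v _
      rw [List.filter_append]
      congr 1
      by_cases h : key x = v <;> simp [h]

-- A's sorted2 at reverse=false is the insertion-sort fold with the lexicographic test
theorem sorted2_false_eq {α : Type} (xs : List α) (k1 k2 : α → Int) :
    PySem.List.sorted2 xs k1 k2 false =
      xs.foldl (fun acc x => PySem.List.insertBy
        (fun a b => decide (k1 a < k1 b) || (!decide (k1 b < k1 a) && decide (k2 a < k2 b))) x acc) [] := rfl

theorem lex_eq_key (a1 a2 b1 b2 : Int) (ha : 0 ≤ a2 ∧ a2 < 3) (hb : 0 ≤ b2 ∧ b2 < 3) :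
    (decide (a1 < b1) || (!decide (b1 < a1) && decide (a2 < b2))) = decide (3 * a1 + a2 < 3 * b1 + b2) := by
  rw [Bool.eq_iff_iff]
  simp only [Bool.or_eq_true, Bool.and_eq_true, Bool.not_eq_true', decide_eq_true_eq,
    decide_eq_false_iff_not]
  omega

-- on a video item the offset is the priority, which lies in [0,3)
theorem video_facts (k? : Option String) (h : pvInVideoKinds k? = true) :
    pvKindOffset k? = some (get_video_source_priority k?).toNat ∧
      0 ≤ get_video_source_priority k? ∧ get_video_source_priority k? < 3 := by
  cases k? with
  | none => simp [pvInVideoKinds] at h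
  | some k =>
      simp only [pvInVideoKinds, Bool.or_eq_true, beq_iff_eq] at h
      rcases h with (h | h) | h <;> subst h <;> decide

theorem offset_none_iff (k? : Option String) :
    pvKindOffset k? = none ↔ pvInVideoKinds k? = false := by
  cases k? with
  | none => simp [pvKindOffset, pvInVideoKinds]
  | some k =>
      by_cases h1 : k = "game_capture"
      · subst h1; decide
      · by_cases h2 : k = "window_capture"
        · subst h2; decide
        · by_cases h3 : k = "monitor_capture"
          · subst h3; decide
          · simp [pvKindOffset, pvInVideoKinds, h1, h2, h3]

theorem getD_map_range' {β : Type} (g : Nat → β) (n i : Nat) (d : β) (hi : i < n) :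
    (((List.range n).map g).getD i d) = g i := by
  rw [List.getD_eq_getElem?_getD]
  simp [hi]

theorem set_map_range {β : Type} (g : Nat → β) (n i : Nat) (v : β) :
    ((List.range n).map g).set i v = (List.range n).map (fun j => if j = i then v else g j) := by
  apply List.ext_getElem
  · simp
  · intro j hj1 hj2
    simp only [List.getElem_set, List.getElem_map, List.getElem_range]
    by_cases h : i = j
    · subst h; simp
    · simp [h, Ne.symm h]

theorem bfold (act shw : Option (List (String × Bool))) :
    ∀ (l : List (List (String × String))) (f0 : Bool) (g : Nat → List (List (String × String))),
      l.foldl (pvStepB act shw) (f0, (List.range 6).map g) =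
        (f0 || l.any (fun z => pvInVideoKinds (pvGetStr z "inputKind")),
         (List.range 6).map (fun i => g i ++ l.filter (fun z => pvIdx? act shw z == some i))) := by
  intro l
  induction l with
  | nil => intro f0 g; simp
  | cons z t ih =>
      intro f0 g
      cases hoff : pvKindOffset (pvGetStr z "inputKind") with
      | none =>
          have hv : pvInVideoKinds (pvGetStr z "inputKind") = false := (offset_none_iff _).mp hoff
          have hidx : pvIdx? act shw z = none := by simp [pvIdx?, hoff]
          rw [List.foldl_cons]
          show (t.foldl (pvStepB act shw) (pvStepB act shw (f0, (List.range 6).map g) z)) = _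
          rw [show pvStepB act shw (f0, (List.range 6).map g) z = (f0, (List.range 6).map g) by
            simp [pvStepB, hoff]]
          rw [ih f0 g]
          simp [hv, hidx]
      | some off =>
          have hv : pvInVideoKinds (pvGetStr z "inputKind") = true := by
            rcases Bool.eq_false_or_eq_true (pvInVideoKinds (pvGetStr z "inputKind")) with h | h
            · exact h
            · rw [(offset_none_iff _).mpr h] at hoff; cases hoff
          have hoff3 : off < 3 := by
            rcases (video_facts _ hv) with ⟨he, h0, h3⟩
            rw [he] at hoff
            injection hoff with hh
            omega
          obtain ⟨idx, hidxdef⟩ : ∃ idx, (if pvExplicitlyInactive act shw z = true then off + 3 else off) = idx := ⟨_, rfl⟩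
          have hidx6 : idx < 6 := by rw [← hidxdef]; split <;> omega
          have hidx : pvIdx? act shw z = some idx := by
            simp only [pvIdx?, hoff, Option.map_some]
            exact congrArg some hidxdef
          rw [List.foldl_cons]
          show (t.foldl (pvStepB act shw) (pvStepB act shw (f0, (List.range 6).map g) z)) = _
          rw [show pvStepB act shw (f0, (List.range 6).map g) z
                = (true, (List.range 6).map (fun j => if j = idx then g idx ++ [z] else g j)) by
            simp only [pvStepB, hoff, pvBucketPut]
            rw [hidxdef, getD_map_range' g 6 idx [] hidx6, set_map_range g 6 idx]]
          rw [ih true _]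
          rw [Prod.mk.injEq]
          refine ⟨by simp [hv], ?_⟩
          · apply List.map_congr_left
            intro i hi
            by_cases h : i = idx
            · subst h
              simp [hidx]
            · have hne : (pvIdx? act shw z == some i) = false := by
                simp [hidx]
                omega
              simp [hne, h]

-- B's bucket predicate vs A's key, pointwise
theorem idx_eq_key (act shw : Option (List (String × Bool))) (z : List (String × String)) (i : Nat) (_hi : i < 6) :
    (pvIdx? act shw z == some i) =
      (pvInVideoKinds (pvGetStr z "inputKind") && decide (pvKey act shw z = (i : Int))) := by
  rcases Bool.eq_false_or_eq_true (pvInVideoKinds (pvGetStr z "inputKind")) with hv | hv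
  case inr =>
    have : pvKindOffset (pvGetStr z "inputKind") = none := (offset_none_iff _).mpr hv
    simp [pvIdx?, this, hv]
  case inl =>
    rcases video_facts _ hv with ⟨he, h0, h3⟩
    simp only [pvIdx?, he, hv, Option.map_some, Bool.true_and]
    have hkey : pvKey act shw z
        = ((if pvExplicitlyInactive act shw z then (get_video_source_priority (pvGetStr z "inputKind")).toNat + 3
            else (get_video_source_priority (pvGetStr z "inputKind")).toNat : Nat) : Int) := by
      unfold pvKey
      split <;> omega
    rw [hkey, Bool.eq_iff_iff]
    simp only [beq_iff_eq, Option.some.injEq, decide_eq_true_eq, Nat.cast_inj]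

theorem key_mem_vals (act shw : Option (List (String × Bool))) (z : List (String × String))
    (hv : pvInVideoKinds (pvGetStr z "inputKind") = true) :
    pvKey act shw z ∈ ([0, 1, 2, 3, 4, 5] : List Int) := by
  rcases video_facts _ hv with ⟨_, h0, h3⟩
  unfold pvKey
  have : (if pvExplicitlyInactive act shw z then (3:Int) else 0) = 0 ∨
         (if pvExplicitlyInactive act shw z then (3:Int) else 0) = 3 := by split <;> simp
  simp only [List.mem_cons, List.not_mem_nil, or_false]
  omega

theorem key_decomp (act shw : Option (List (String × Bool))) (z : List (String × String)) :
    pvKey act shw z = 3 * (if pvExplicitlyInactive act shw z then (1:Int) else 0)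
      + get_video_source_priority (pvGetStr z "inputKind") := by
  unfold pvKey; split <;> ring

-- ===== VERDICT (by name: the statement is the Claim_ definition above) =====
theorem sort_video_sources_by_preference_spec : Claim_equal_sort_video_sources_by_preference := by
  intro scene_items act shw _
  unfold Spec_sort_video_sources_by_preference
  unfold sort_video_sources_by_preference sort_video_sources_by_preference_alt
  by_cases hempty : scene_items.isEmpty
  · simp [hempty]
  · have h1 : scene_items.isEmpty = false := by simpa using hempty
    have hinit : ([[], [], [], [], [], []] : List (List (List (String × String))))
        = (List.range 6).map (fun _ => []) := by rfl
    rw [hinit, bfold act shw scene_items false (fun _ => [])]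
    set P : List (String × String) → Bool := fun item => pvInVideoKinds (pvGetStr item "inputKind") with hP
    by_cases hany : scene_items.any P
    · -- some video source: A sorts, B concatenates its buckets
      have hvs : (scene_items.filter P).isEmpty = false := by
        rcases List.any_eq_true.mp hany with ⟨x, hx, hpx⟩
        simp only [List.isEmpty_eq_false_iff]
        exact List.ne_nil_of_mem (List.mem_filter.mpr ⟨hx, hpx⟩)
      simp only [h1, hany, hvs, Bool.false_eq_true, Bool.false_or, if_true, if_false]
      rw [sorted2_false_eq]
      rw [foldl_insert_buckets _ (pvKey act shw) ([0, 1, 2, 3, 4, 5] : List Int) (by decide)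
            (scene_items.filter P)
            (by
              intro x hx
              exact key_mem_vals act shw x (by simpa [hP] using (List.mem_filter.mp hx).2))
            (by
              intro x hx y hy
              have hvx : pvInVideoKinds (pvGetStr x "inputKind") = true := by
                simpa [hP] using (List.mem_filter.mp hx).2
              have hvy : pvInVideoKinds (pvGetStr y "inputKind") = true := by
                simpa [hP] using (List.mem_filter.mp hy).2
              rcases video_facts _ hvx with ⟨_, hx0, hx3⟩
              rcases video_facts _ hvy with ⟨_, hy0, hy3⟩
              rw [lex_eq_key _ _ _ _ ⟨hx0, hx3⟩ ⟨hy0, hy3⟩, key_decomp act shw x, key_decomp act shw y])]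
      have hbuck : ∀ (i : Nat), i < 6 →
          (scene_items.filter P).filter (fun z => decide (pvKey act shw z = (i : Int)))
            = scene_items.filter (fun z => pvIdx? act shw z == some i) := by
        intro i hi6
        rw [List.filter_filter]
        refine (List.filter_congr ?_)
        intro z _
        rw [idx_eq_key act shw z i hi6, hP]
        exact Bool.and_comm _ _
      have h0 := hbuck 0 (by omega)
      have h1' := hbuck 1 (by omega)
      have h2 := hbuck 2 (by omega)
      have h3 := hbuck 3 (by omega)
      have h4 := hbuck 4 (by omega)
      have h5 := hbuck 5 (by omega)
      push_cast at h0 h1' h2 h3 h4 h5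
      rw [show List.range 6 = [0, 1, 2, 3, 4, 5] from rfl]
      simp only [List.flatMap_cons, List.flatMap_nil, List.map_cons, List.map_nil,
        List.flatten_cons, List.flatten_nil, List.append_nil, List.nil_append,
        h0, h1', h2, h3, h4, h5]
    · -- no video source: both return scene_items
      have hvs : (scene_items.filter P).isEmpty = true := by
        have hall := List.any_eq_false.mp (by simpa using hany)
        simp only [List.isEmpty_iff, List.filter_eq_nil_iff]
        exact fun x hx => by simp [hall x hx]
      have hany' : scene_items.any P = false := by simpa using hany
      simp [h1, hany', hvs]
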